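-- pv_equiv track=rewrite | github.com/Jojo14258/PlantsVsZombies | model.py | carteVersMatrice
-- ===== SOURCE A (Python) =====
-- def carteVersMatrice(x, y):
--     longueur = 64  #debut = 284 - 220
--     largeur = 81  #235 - 154
--     departy = (y-largeur)
--     dictTuiles = {}
--     for y in range(0,5):
--         departx = x
--         numero = 9*(y)+1
--         while numero <= 9*y+9:
--             dictTuiles[numero] = [departx, departx+longueur], [departy, departy+largeur]
--             departx += longueur
--             numero += 1
--         departy += largeur
--     return dictTuiles
-- ===== SOURCE B (Python) =====
-- def carteVersMatrice(x, y):
--     return {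
--         n: ([x + ((n - 1) % 9) * 64, x + ((n - 1) % 9) * 64 + 64],
--             [(y - 81) + ((n - 1) // 9) * 81, (y - 81) + ((n - 1) // 9) * 81 + 81])
--         for n in range(1, 46)
--     }
-- ===== Notes on version B (the rewrite author's own statement) =====
-- stated objective: simpler
-- what changed: Replaces the nested for/while loops that step departx/departy by repeated addition with a single dict comprehension over the cell number, computing each cell's coordinates in closed form from divmod(n-1, 9).
import Mathlib
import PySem

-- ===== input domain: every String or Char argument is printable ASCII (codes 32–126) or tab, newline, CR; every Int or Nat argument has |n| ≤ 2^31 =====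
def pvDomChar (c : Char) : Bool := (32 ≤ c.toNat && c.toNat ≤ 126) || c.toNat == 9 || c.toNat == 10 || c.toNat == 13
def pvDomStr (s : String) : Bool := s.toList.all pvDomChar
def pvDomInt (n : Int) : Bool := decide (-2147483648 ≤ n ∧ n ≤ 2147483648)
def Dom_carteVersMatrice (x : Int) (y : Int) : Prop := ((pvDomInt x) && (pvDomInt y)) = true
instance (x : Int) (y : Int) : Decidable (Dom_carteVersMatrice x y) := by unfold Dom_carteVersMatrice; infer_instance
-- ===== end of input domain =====

-- B replaces A's nested accumulator loops by a single closed-form dict comprehension; objective: simpler.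

-- ===== PORT A =====
-- the inner `while numero <= 9*y+9` loop of A, step for step
def carteWhile (longueur largeur yv : Int) (numero departx departy : Int)
    (d : PySem.Dict Int (List (List Int))) : PySem.Dict Int (List (List Int)) :=
  if numero ≤ 9 * yv + 9 then
    carteWhile longueur largeur yv (numero + 1) (departx + longueur) departy
      (d.insert numero [[departx, departx + longueur], [departy, departy + largeur]])
  else d
termination_by (9 * yv + 9 + 1 - numero).toNat
decreasing_by omega

def carteVersMatrice (x : Int) (y : Int) : List (Int × List (List Int)) :=
  let longueur : Int := 64
  let largeur : Int := 81
  let departy := y - largeur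
  let dictTuiles : PySem.Dict Int (List (List Int)) := PySem.Dict.empty
  let st := (PySem.List.pyRange 0 5 1).foldl
    (fun (st : Int × PySem.Dict Int (List (List Int))) yv =>
      let departx := x
      let numero := 9 * yv + 1
      let d' := carteWhile longueur largeur yv numero departx st.1 st.2
      (st.1 + largeur, d'))
    (departy, dictTuiles)
  st.2.items

-- ===== PORT B =====
def carteVersMatrice_alt (x : Int) (y : Int) : List (Int × List (List Int)) :=
  (PySem.List.pyRange 1 46 1).map (fun n =>
    (n, [[x + PySem.Int.mod (n - 1) 9 * 64, x + PySem.Int.mod (n - 1) 9 * 64 + 64],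
         [(y - 81) + PySem.Int.floordiv (n - 1) 9 * 81,
          (y - 81) + PySem.Int.floordiv (n - 1) 9 * 81 + 81]]))

-- ===== PRECONDITION & SPEC =====
def Spec_carteVersMatrice (x : Int) (y : Int) (out : List (Int × List (List Int))) : Prop := out = carteVersMatrice_alt x y
instance (x : Int) (y : Int) (out : List (Int × List (List Int))) : Decidable (Spec_carteVersMatrice x y out) := by unfold Spec_carteVersMatrice; infer_instance

-- ===== CLAIM (what is proved, stated in full; the proofs are below) =====
def Claim_equal_carteVersMatrice : Prop := ∀ (x : Int) (y : Int), Dom_carteVersMatrice x y → Spec_carteVersMatrice x y (carteVersMatrice x y)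

-- ===== LEMMAS AND PROOFS =====

-- ===== VERDICT (by name: the statement is the Claim_ definition above) =====
set_option maxRecDepth 20000 in
set_option maxHeartbeats 2000000 in
theorem carteVersMatrice_spec : Claim_equal_carteVersMatrice := by
  intro x y _
  unfold Spec_carteVersMatrice carteVersMatrice carteVersMatrice_alt
  simp only [show PySem.List.pyRange 0 5 1 = [0,1,2,3,4] from by decide,
    show PySem.List.pyRange 1 46 1 = [1,2,3,4,5,6,7,8,9,10,11,12,13,14,15,16,17,18,19,20,21,22,23,24,25,26,27,28,29,30,31,32,33,34,35,36,37,38,39,40,41,42,43,44,45] from by decide,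
    List.foldl, List.map]
  simp [carteWhile, PySem.Dict.insert, PySem.Dict.empty,
    PySem.Int.mod, PySem.Int.floordiv]
  omega
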